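-- pv_equiv track=rewrite | github.com/Chonapatcc/Clean-Data | bro.py | onlyeng
-- ===== SOURCE A (Python) =====
-- def remove_parenthesis(string):
--     string = string.strip("(")
--     string = string.strip(")")
--     return string
--
-- def replace_parenthesis(string):
--     string = string.replace('(','')
--     string =string.replace(')','')
--     return string
--
-- def remove_spaces(string):
--     string = string.strip()
--     return string
--
-- def onlyeng(string):
--     emp=[]
--     lst = string.split()
--     ch1 = string.startswith('Phra')
--     for val in lst:
--         if(ch1):
--             val = remove_spaces(val)
--         else:
--             val = remove_spaces(val)
--             val = remove_parenthesis(val)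
--             val = replace_parenthesis(val)
--         emp.append(val)
--     string = ' '.join(emp)
--     return string
-- ===== SOURCE B (Python) =====
-- def onlyeng(string):
--     drop = not string.startswith('Phra')
--     out = []
--     in_token = False
--     first = True
--     for ch in string:
--         if ch.isspace():
--             in_token = False
--         else:
--             if not in_token:
--                 if not first:
--                     out.append(' ')
--                 first = False
--                 in_token = True
--             if drop and (ch == '(' or ch == ')'):
--                 continue
--             out.append(ch)
--     return ''.join(out)
-- ===== Notes on version B (the rewrite author's own statement) =====
-- stated objective: alternative
-- what changed: Replaces A's split-into-tokens / per-token strip-and-replace / join pipeline with a single character-level state machine over the raw string (flags: inside-a-token, first-token) that emits output characters and separators in one pass and never builds a token list.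
import Mathlib
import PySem

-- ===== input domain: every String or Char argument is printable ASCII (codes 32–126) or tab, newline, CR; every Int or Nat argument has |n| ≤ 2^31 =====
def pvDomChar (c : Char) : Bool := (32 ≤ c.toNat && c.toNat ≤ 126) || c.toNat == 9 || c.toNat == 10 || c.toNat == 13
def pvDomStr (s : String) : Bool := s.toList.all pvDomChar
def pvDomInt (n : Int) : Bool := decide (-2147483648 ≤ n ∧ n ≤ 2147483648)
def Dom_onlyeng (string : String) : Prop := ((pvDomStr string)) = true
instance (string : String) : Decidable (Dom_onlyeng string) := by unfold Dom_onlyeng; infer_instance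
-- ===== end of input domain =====

-- B is a single character-level state machine over the raw string (one pass, no token list),
-- instead of A's split / per-token strip-parens-replace loop / join pipeline (objective: alternative).


-- ===== PORT A =====
def remove_parenthesis (string : String) : String :=
  let string := PySem.Str.stripChars string "("
  let string := PySem.Str.stripChars string ")"
  string

def replace_parenthesis (string : String) : String :=
  let string := PySem.Str.replace string "(" ""
  let string := PySem.Str.replace string ")" ""
  string

def remove_spaces (string : String) : String :=
  PySem.Str.strip string

def onlyeng (string : String) : String :=
  let emp : List String := []
  let lst := PySem.Str.split₀ string
  let ch1 := PySem.Str.startswith string "Phra"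
  let emp := lst.foldl (fun emp val =>
    if ch1 then
      emp ++ [remove_spaces val]
    else
      emp ++ [replace_parenthesis (remove_parenthesis (remove_spaces val))]) emp
  PySem.Str.join " " emp

-- ===== PORT B =====
-- B's loop body: one step of the character scan; state = (out, in_token, first)
def pvStep (drop : Bool) (s : List Char × Bool × Bool) (ch : Char) : List Char × Bool × Bool :=
  let out := s.1
  let in_token := s.2.1
  let first := s.2.2
  if PySem.Chars.isspace ch then (out, false, first)
  else
    let out := if in_token then out else (if first then out else out ++ [' '])
    let first := if in_token then first else false
    if drop && (ch == '(' || ch == ')') then (out, true, first)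
    else (out ++ [ch], true, first)

-- one left-to-right pass; ''.join(out) = String.ofList
def onlyeng_alt (string : String) : String :=
  let drop := !(PySem.Str.startswith string "Phra")
  let st := string.toList.foldl (pvStep drop) ([], false, true)
  String.ofList st.1

-- ===== PRECONDITION & SPEC =====
def Spec_onlyeng (string : String) (out : String) : Prop := out = onlyeng_alt string
instance (string : String) (out : String) : Decidable (Spec_onlyeng string out) := by unfold Spec_onlyeng; infer_instance

-- ===== CLAIM (what is proved, stated in full; the proofs are below) =====
def Claim_equal_onlyeng : Prop := ∀ (string : String), Dom_onlyeng string → Spec_onlyeng string (onlyeng string)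

-- ===== LEMMAS AND PROOFS =====

def pvKeep (drop : Bool) (c : Char) : Bool := !(drop && (c == '(' || c == ')'))

-- what the scan emits from `rest`, given flags (in_token, first)
def pvE (drop : Bool) : List Char → Bool → Bool → List Char
  | [], _, _ => []
  | c :: r, it, fi =>
    if PySem.Chars.isspace c then pvE drop r false fi
    else
      (if it then [] else (if fi then [] else [' ']))
        ++ (if pvKeep drop c then [c] else []) ++ pvE drop r true (if it then fi else false)

theorem pv_foldl_step (drop : Bool) (rest : List Char) :
    ∀ (out : List Char) (it fi : Bool),
      (rest.foldl (pvStep drop) (out, it, fi)).1 = out ++ pvE drop rest it fi := by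
  induction rest with
  | nil => intro out it fi; simp [pvE]
  | cons c r ih =>
    intro out it fi
    simp only [List.foldl_cons, pvE]
    by_cases hsp : PySem.Chars.isspace c = true
    · simp [pvStep, hsp, ih]
    · have hk' : (drop && (c == '(' || c == ')')) = !(pvKeep drop c) := by
        simp [pvKeep]
      by_cases hk : pvKeep drop c = true <;>
        cases it <;> cases fi <;> simp [pvStep, hsp, hk', hk, ih]

theorem pv_go_acc (rest : List Char) :
    ∀ (cur : List Char) (acc : List (List Char)),
      PySem.Chars.split₀.go rest cur acc = acc.reverse ++ PySem.Chars.split₀.go rest cur [] := by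
  induction rest with
  | nil =>
    intro cur acc
    simp only [PySem.Chars.split₀.go]
    split <;> simp
  | cons c r ih =>
    intro cur acc
    simp only [PySem.Chars.split₀.go]
    split
    · split
      · exact ih [] acc
      · rw [ih [] (cur.reverse :: acc), ih [] [cur.reverse]]
        simp
    · exact ih (c :: cur) acc

theorem pv_go_ne_nil (rest : List Char) :
    ∀ (cur : List Char), cur ≠ [] → PySem.Chars.split₀.go rest cur [] ≠ [] := by
  induction rest with
  | nil =>
    intro cur hc
    simp only [PySem.Chars.split₀.go]
    simp [List.isEmpty_iff, hc]
  | cons c r ih =>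
    intro cur hc
    simp only [PySem.Chars.split₀.go]
    split
    · rw [if_neg (by simp [List.isEmpty_iff, hc]), pv_go_acc]
      simp
    · exact ih (c :: cur) (by simp)

-- join with a separator in front of every token (used for the state "between tokens, not first")
def pvPreJ : List (List Char) → List Char
  | [] => []
  | l => ' ' :: PySem.Chars.join [' '] l

theorem pv_join_cons (a : List Char) (l : List (List Char)) :
    PySem.Chars.join [' '] (a :: l) = a ++ pvPreJ l := by
  cases l with
  | nil => simp [PySem.Chars.join, pvPreJ, List.intercalate]
  | cons b t =>
    simp [PySem.Chars.join, pvPreJ, List.intercalate, List.intersperse]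

-- the emission of the scan, per flag state, equals the filtered-token join of split₀.go
theorem pv_E_go (drop : Bool) (rest : List Char) :
    (pvE drop rest false true
        = PySem.Chars.join [' '] ((PySem.Chars.split₀.go rest [] []).map (List.filter (pvKeep drop))))
    ∧ (pvE drop rest false false
        = pvPreJ ((PySem.Chars.split₀.go rest [] []).map (List.filter (pvKeep drop))))
    ∧ (∀ cur : List Char, cur ≠ [] →
        PySem.Chars.join [' '] ((PySem.Chars.split₀.go rest cur []).map (List.filter (pvKeep drop)))
          = cur.reverse.filter (pvKeep drop) ++ pvE drop rest true false) := by
  induction rest with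
  | nil =>
    refine ⟨?_, ?_, ?_⟩
    · simp [pvE, PySem.Chars.split₀.go, PySem.Chars.join, List.intercalate]
    · simp [pvE, PySem.Chars.split₀.go, pvPreJ]
    · intro cur hc
      simp only [PySem.Chars.split₀.go]
      rw [if_neg (by simp [List.isEmpty_iff, hc])]
      simp [pvE]
  | cons c r ih =>
    obtain ⟨ih1, ih2, ih3⟩ := ih
    by_cases hsp : PySem.Chars.isspace c = true
    · refine ⟨?_, ?_, ?_⟩
      · simp only [pvE, hsp, if_true]
        simpa [PySem.Chars.split₀.go, hsp] using ih1
      · simp only [pvE, hsp, if_true]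
        simpa [PySem.Chars.split₀.go, hsp] using ih2
      · intro cur hc
        simp only [PySem.Chars.split₀.go, hsp, if_true]
        rw [if_neg (by simp [List.isEmpty_iff, hc]), pv_go_acc]
        simp only [pvE, hsp, if_true, List.reverse_cons, List.reverse_nil, List.nil_append,
          List.map_append, List.map_cons, List.map_nil]
        rw [List.singleton_append, pv_join_cons, ih2]
    · have hgo : PySem.Chars.split₀.go (c :: r) [] [] = PySem.Chars.split₀.go r [c] [] := by
        simp [PySem.Chars.split₀.go, hsp]
      have hfc : List.filter (pvKeep drop) [c] = (if pvKeep drop c then [c] else []) := by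
        by_cases h : pvKeep drop c = true <;> simp [List.filter, h]
      refine ⟨?_, ?_, ?_⟩
      · rw [hgo, ih3 [c] (by simp)]
        simp [pvE, hsp, hfc]
      · rw [hgo]
        have hne := pv_go_ne_nil r [c] (by simp)
        have hne' : (PySem.Chars.split₀.go r [c] []).map (List.filter (pvKeep drop)) ≠ [] := by
          simpa using hne
        cases hmap : (PySem.Chars.split₀.go r [c] []).map (List.filter (pvKeep drop)) with
        | nil => exact absurd hmap hne'
        | cons a t =>
          simp only [pvE, hsp, if_false, Bool.false_eq_true, pvPreJ]
          rw [← hmap, ih3 [c] (by simp)]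
          simp [hfc]
      · intro cur hc
        have hgo' : PySem.Chars.split₀.go (c :: r) cur [] = PySem.Chars.split₀.go r (c :: cur) [] := by
          simp [PySem.Chars.split₀.go, hsp]
        rw [hgo', ih3 (c :: cur) (by simp)]
        simp [pvE, hsp, List.filter_append, hfc]

-- ===== A-side lemmas (reduce A to a filtered-token join over split₀) =====

theorem pv_dropWhile_eq_self {α : Type} (p : α → Bool) (l : List α)
    (h : ∀ x ∈ l, p x = false) : l.dropWhile p = l := by
  cases l with
  | nil => rfl
  | cons a t => simp [List.dropWhile, h a (by simp)]

theorem pv_strip_id (t : List Char) (h : ∀ c ∈ t, PySem.Chars.isspace c = false) :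
    PySem.Chars.strip t = t := by
  simp [PySem.Chars.strip, PySem.Chars.lstrip, PySem.Chars.rstrip,
    pv_dropWhile_eq_self PySem.Chars.isspace t h,
    pv_dropWhile_eq_self PySem.Chars.isspace t.reverse (by simpa using fun c hc => h c hc)]

theorem pv_split₀_go_nospace (rest cur : List Char) (acc : List (List Char))
    (hcur : ∀ c ∈ cur, PySem.Chars.isspace c = false)
    (hacc : ∀ t ∈ acc, ∀ c ∈ t, PySem.Chars.isspace c = false) :
    ∀ t ∈ PySem.Chars.split₀.go rest cur acc, ∀ c ∈ t, PySem.Chars.isspace c = false := by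
  induction rest generalizing cur acc with
  | nil =>
    intro t ht
    simp only [PySem.Chars.split₀.go] at ht
    split at ht
    · exact hacc t (by simpa using ht)
    · rw [List.mem_reverse, List.mem_cons] at ht
      rcases ht with ht | ht
      · subst ht
        intro c hc
        exact hcur c (List.mem_reverse.mp hc)
      · exact hacc t ht
  | cons a rest ih =>
    intro t ht
    simp only [PySem.Chars.split₀.go] at ht
    split at ht
    · split at ht
      · exact ih [] acc (by simp) hacc t ht
      · refine ih [] (cur.reverse :: acc) (by simp) ?_ t ht
        intro u hu
        rcases List.mem_cons.mp hu with hu | hu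
        · subst hu
          intro c hc
          exact hcur c (List.mem_reverse.mp hc)
        · exact hacc u hu
    · rename_i hsp
      refine ih (a :: cur) acc ?_ hacc t ht
      intro c hc
      rcases List.mem_cons.mp hc with hc | hc
      · subst hc
        simpa using hsp
      · exact hcur c hc

theorem pv_split₀_nospace (s : List Char) :
    ∀ t ∈ PySem.Chars.split₀ s, ∀ c ∈ t, PySem.Chars.isspace c = false := by
  exact pv_split₀_go_nospace s [] [] (by simp) (by simp)

theorem pv_replace_go_single (c : Char) (l : List Char) (acc : List Char) (fuel : Nat)
    (h : l.length ≤ fuel) :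
    PySem.Chars.replace.go [c] [] fuel l acc = acc.reverse ++ l.filter (fun x => x != c) := by
  induction l generalizing fuel acc with
  | nil => cases fuel <;> simp [PySem.Chars.replace.go]
  | cons a t ih =>
    cases fuel with
    | zero => simp at h
    | succ f =>
      simp only [PySem.Chars.replace.go]
      by_cases hac : c = a
      · subst hac
        simp only [List.isPrefixOf, BEq.rfl, Bool.true_and, if_pos,
          List.length_cons, List.length_nil, Nat.zero_add, List.drop_succ_cons, List.drop_zero,
          List.reverse_nil, List.nil_append]
        rw [ih acc f (Nat.le_of_succ_le_succ h)]
        simp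
      · have hpre : ([c].isPrefixOf (a :: t)) = false := by
          simp [List.isPrefixOf, beq_eq_false_iff_ne]; exact hac
        rw [hpre]
        simp only [Bool.false_eq_true, if_false]
        rw [ih (a :: acc) f (Nat.le_of_succ_le_succ h)]
        simp [Ne.symm hac]

theorem pv_replace_single (c : Char) (l : List Char) :
    PySem.Chars.replace l [c] [] = l.filter (fun x => x != c) := by
  simp only [PySem.Chars.replace, List.isEmpty_cons, Bool.false_eq_true, if_false]
  simpa using pv_replace_go_single c l [] l.length (le_refl _)

theorem pv_filter_dropWhile {α : Type} (p q : α → Bool) (l : List α)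
    (h : ∀ x, q x = true → p x = false) :
    (l.dropWhile q).filter p = l.filter p := by
  induction l with
  | nil => rfl
  | cons a t ih =>
    by_cases hq : q a = true
    · simp [List.dropWhile, hq, List.filter, h a hq, ih]
    · simp [List.dropWhile, hq]

theorem pv_filter_stripChars (p : Char → Bool) (cs chars : List Char)
    (h : ∀ x, chars.contains x = true → p x = false) :
    (PySem.Chars.stripChars cs chars).filter p = cs.filter p := by
  simp only [PySem.Chars.stripChars]
  rw [List.filter_reverse, pv_filter_dropWhile p _ _ h, List.filter_reverse,
    List.reverse_reverse, pv_filter_dropWhile p _ _ h]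

-- the per-token chain on a whitespace-free token is a filter by "not a parenthesis"
theorem pv_token_eq (v : List Char) (hv : ∀ c ∈ v, PySem.Chars.isspace c = false) :
    PySem.Chars.replace (PySem.Chars.replace
        (PySem.Chars.stripChars (PySem.Chars.stripChars (PySem.Chars.strip v) ['(']) [')'])
        ['('] []) [')'] []
      = v.filter (fun x => x != ')' && x != '(') := by
  rw [pv_strip_id v hv, pv_replace_single, pv_replace_single, List.filter_filter]
  rw [pv_filter_stripChars _ _ _ (by intro x hx; simp at hx; simp [hx]),
    pv_filter_stripChars _ _ _ (by intro x hx; simp at hx; simp [hx])]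

theorem pv_keep_eq (c : Char) :
    pvKeep true c = (c != ')' && c != '(') := by
  by_cases h1 : c = '(' <;> by_cases h2 : c = ')' <;> simp [pvKeep, bne, h1, h2, Bool.and_comm]

-- ===== VERDICT (by name: the statement is the Claim_ definition above) =====
theorem onlyeng_spec : Claim_equal_onlyeng := by
  intro string _
  unfold Spec_onlyeng onlyeng onlyeng_alt
  apply String.toList_inj.mp
  have hB : ∀ drop : Bool,
      (String.ofList (string.toList.foldl (pvStep drop) ([], false, true)).1).toList
        = PySem.Chars.join [' ']
            ((PySem.Str.split₀ string).map (List.filter (pvKeep drop) ∘ String.toList)) := by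
    intro drop
    rw [String.toList_ofList, pv_foldl_step]
    rw [← List.map_map, PySem.Str.split₀_map_toList]
    simpa [PySem.Chars.split₀] using (pv_E_go drop string.toList).1
  have hsep : (" " : String).toList = [' '] := rfl
  have h1 : ("(" : String).toList = ['('] := rfl
  have h2 : (")" : String).toList = [')'] := rfl
  have h0 : ("" : String).toList = [] := rfl
  by_cases hch : PySem.Str.startswith string "Phra" = true
  · simp only [hch, if_true, PySem.List.foldl_append_singleton_eq_map, List.nil_append,
      PySem.Str.toList_join, List.map_map, Bool.not_true]
    rw [hB false, hsep]
    refine congrArg (PySem.Chars.join [' ']) (List.map_congr_left ?_)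
    intro v hv
    have hv' : v.toList ∈ PySem.Chars.split₀ string.toList := by
      rw [← PySem.Str.split₀_map_toList]; exact List.mem_map_of_mem hv
    have hkeep : pvKeep false = fun _ => true := by funext c; simp [pvKeep]
    simp [Function.comp, remove_spaces, pv_strip_id v.toList (pv_split₀_nospace _ _ hv'),
      hkeep, List.filter_true]
  · simp only [hch, Bool.false_eq_true, if_false, PySem.List.foldl_append_singleton_eq_map,
      List.nil_append, PySem.Str.toList_join, List.map_map, Bool.not_false]
    rw [hB true, hsep]
    refine congrArg (PySem.Chars.join [' ']) (List.map_congr_left ?_)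
    intro v hv
    have hv' : v.toList ∈ PySem.Chars.split₀ string.toList := by
      rw [← PySem.Str.split₀_map_toList]; exact List.mem_map_of_mem hv
    have hns := pv_split₀_nospace _ _ hv'
    simp only [Function.comp_apply, remove_spaces, remove_parenthesis, replace_parenthesis,
      PySem.Str.toList_replace, PySem.Str.toList_stripChars, PySem.Str.toList_strip]
    rw [h1, h2, h0]
    rw [pv_token_eq v.toList hns]
    exact List.filter_congr (fun c _ => (pv_keep_eq c).symm)
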